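-- pv_equiv track=rewrite | github.com/uniyalmanas/NoFeeSwap | operator_repo/tests/Nofee.py | encodeKernelCompact
-- ===== SOURCE A (Python) =====
-- def encodeKernelCompact(kernel):
--     i = 0
--     k = 0
--     for point in kernel[1:]:
--         k <<= 16
--         k += point[1]
--         k <<= 64
--         k += point[0]
--         i += 80
--     if i % 256 != 0:
--         k = k << (256 - (i % 256))
--         i = i + (256 - (i % 256))
--     l = i // 256
--     kernelShortArray = [0] * l
--     while l != 0:
--         l -= 1
--         kernelShortArray[l] = k % (2 ** 256)
--         k //= (2 ** 256)
--
--     return kernelShortArray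
-- ===== SOURCE B (Python) =====
-- def encodeKernelCompact(kernel):
--     pts = kernel[1:]
--     pad = (-80 * len(pts)) % 256
--     # little-endian 16-bit chunks of the packed (and zero-padded) bitstream;
--     # each point contributes exactly 80 bits, carries propagate via `carry`
--     chunks = [0] * (pad // 16)
--     carry = 0
--     for point in reversed(pts):
--         t = carry + (point[1] << 64) + point[0]
--         for _ in range(5):
--             chunks.append(t & 0xFFFF)
--             t >>= 16
--         carry = t
--     # regroup: 16 chunks = one 256-bit word; emit most-significant word first
--     chunksBE = chunks[::-1]
--     words = []
--     while chunksBE: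
--         word = 0
--         for c in chunksBE[:16]:
--             word = (word << 16) + c
--         words.append(word)
--         chunksBE = chunksBE[16:]
--     return words
-- ===== Notes on version B (the rewrite author's own statement) =====
-- stated objective: faster
-- what changed: Instead of accumulating one ever-growing big integer with per-point 80-bit shifts and then splitting it by repeated 256-bit divmod, B packs each point into fixed 16-bit chunks in one reverse pass with a small running carry and regroups 16 chunks per 256-bit word.
import Mathlib
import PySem

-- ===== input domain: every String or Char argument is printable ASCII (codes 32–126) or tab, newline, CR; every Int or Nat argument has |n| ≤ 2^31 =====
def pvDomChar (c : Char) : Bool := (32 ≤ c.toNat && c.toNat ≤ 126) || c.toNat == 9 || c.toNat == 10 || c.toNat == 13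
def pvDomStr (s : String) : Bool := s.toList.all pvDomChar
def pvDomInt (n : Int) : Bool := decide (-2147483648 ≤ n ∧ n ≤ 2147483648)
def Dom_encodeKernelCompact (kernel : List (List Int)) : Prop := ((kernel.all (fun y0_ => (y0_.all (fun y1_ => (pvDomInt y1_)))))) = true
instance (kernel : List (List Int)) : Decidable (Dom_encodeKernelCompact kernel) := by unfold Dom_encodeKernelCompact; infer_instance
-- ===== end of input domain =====

-- B replaces A's quadratic big-integer accumulation (per-point 80-bit shifts of one
-- growing number, then repeated 256-bit divmod) by a linear one-pass packing into
-- 16-bit chunks with a running carry, regrouped 16 chunks per 256-bit word.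

-- ===== PORT A =====
-- the 'for point in kernel[1:]' accumulation step: k <<= 16; k += point[1]; k <<= 64; k += point[0]; i += 80
def pvStepA (s : Int × Int) (point : List Int) : Int × Int :=
  (s.1 + 80,
   (s.2 * 2 ^ 16 + PySem.List.pyGetD point 1 0) * 2 ^ 64 + PySem.List.pyGetD point 0 0)

-- the trailing 'while l != 0' loop: fills the array back-to-front with k % 2^256, k //= 2^256
def pvFillA : Nat → Int → List Int → List Int
  | 0, _, acc => acc
  | l + 1, k, acc => pvFillA l (PySem.Int.floordiv k (2 ^ 256)) (PySem.Int.mod k (2 ^ 256) :: acc)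

def encodeKernelCompact (kernel : List (List Int)) : List Int :=
  let s := (kernel.drop 1).foldl pvStepA (0, 0)
  let k := if PySem.Int.mod s.1 256 ≠ 0 then s.2 * 2 ^ (256 - PySem.Int.mod s.1 256).toNat else s.2
  let i := if PySem.Int.mod s.1 256 ≠ 0 then s.1 + (256 - PySem.Int.mod s.1 256) else s.1
  pvFillA (PySem.Int.floordiv i 256).toNat k []

-- ===== PORT B =====
-- one point of Source B's reverse pass: t = carry + (y<<64) + x; five times append t & 0xFFFF, t >>= 16
def pvStepB (s : List Int × Int) (point : List Int) : List Int × Int :=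
  let t := s.2 + (PySem.List.pyGetD point 1 0) * 2 ^ 64 + PySem.List.pyGetD point 0 0
  (List.range 5).foldl
    (fun (r : List Int × Int) _ =>
      (r.1 ++ [PySem.Int.mod r.2 (2 ^ 16)], PySem.Int.floordiv r.2 (2 ^ 16)))
    (s.1, t)

-- Source B's 'while chunksBE:' loop: one 256-bit word per 16 big-endian chunks
def pvPackWords : List Int → List Int
  | [] => []
  | c :: cs =>
    ((c :: cs).take 16).foldl (fun w x => w * 2 ^ 16 + x) 0 :: pvPackWords ((c :: cs).drop 16)
  termination_by l => l.length
  decreasing_by simp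

def encodeKernelCompact_alt (kernel : List (List Int)) : List Int :=
  let pts := kernel.drop 1
  let pad := (PySem.Int.mod (-80 * (pts.length : Int)) 256).toNat
  let s := pts.reverse.foldl pvStepB (List.replicate (pad / 16) 0, 0)
  pvPackWords s.1.reverse

-- ===== PRECONDITION & SPEC =====
-- Pre_ excludes exactly the inputs where A raises: 'point[1]' is an IndexError when a
-- row after the first has fewer than 2 entries.
def Pre_encodeKernelCompact (kernel : List (List Int)) : Prop :=
  ∀ p ∈ kernel.drop 1, 2 ≤ p.length
instance (kernel : List (List Int)) : Decidable (Pre_encodeKernelCompact kernel) := by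
  unfold Pre_encodeKernelCompact; infer_instance

def pvWitness_encodeKernelCompact : List (List Int) := [[], [1, 2], [-3, 4]]

def Spec_encodeKernelCompact (kernel : List (List Int)) (out : List Int) : Prop :=
  out = encodeKernelCompact_alt kernel
instance (kernel : List (List Int)) (out : List Int) : Decidable (Spec_encodeKernelCompact kernel out) := by
  unfold Spec_encodeKernelCompact; infer_instance

-- ===== CLAIM (what is proved, stated in full; the proofs are below) =====
def Claim_equal_encodeKernelCompact : Prop := ∀ (kernel : List (List Int)), Dom_encodeKernelCompact kernel → Pre_encodeKernelCompact kernel → Spec_encodeKernelCompact kernel (encodeKernelCompact kernel)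

-- ===== LEMMAS AND PROOFS =====

-- value of one point: y * 2^64 + x
def pvV (p : List Int) : Int :=
  PySem.List.pyGetD p 1 0 * 2 ^ 64 + PySem.List.pyGetD p 0 0

-- the packed bitstream as one integer (first point topmost)
def pvStream : List (List Int) → Int
  | [] => 0
  | p :: tl => pvV p * 2 ^ (80 * tl.length) + pvStream tl

-- value of a little-endian list of 16-bit chunks
def pvVal : List Int → Int
  | [] => 0
  | c :: cs => c + 2 ^ 16 * pvVal cs

-- little-endian base-2^256 digits (Python floor semantics)
def pvDigits : Nat → Int → List Int
  | 0, _ => []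
  | l + 1, k => PySem.Int.mod k (2 ^ 256) :: pvDigits l (PySem.Int.floordiv k (2 ^ 256))

-- little-endian words built out of 16-chunk groups
def pvWordsLE : Nat → List Int → List Int
  | 0, _ => []
  | l + 1, ch => (ch.take 16).reverse.foldl (fun w x => w * 2 ^ 16 + x) 0 :: pvWordsLE l (ch.drop 16)

-- low 16n bits of t as chunks, and t shifted down by 16n bits
def pvLow : Nat → Int → List Int
  | 0, _ => []
  | n + 1, t => PySem.Int.mod t (2 ^ 16) :: pvLow n (PySem.Int.floordiv t (2 ^ 16))

def pvShift : Nat → Int → Int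
  | 0, t => t
  | n + 1, t => pvShift n (PySem.Int.floordiv t (2 ^ 16))

lemma pvFillA_eq (l : Nat) : ∀ (k : Int) (acc : List Int),
    pvFillA l k acc = (pvDigits l k).reverse ++ acc := by
  induction l with
  | zero => intro k acc; simp [pvFillA, pvDigits]
  | succ l ih => intro k acc; simp [pvFillA, pvDigits, ih]


lemma pvVal_append (xs ys : List Int) :
    pvVal (xs ++ ys) = pvVal xs + 2 ^ (16 * xs.length) * pvVal ys := by
  induction xs with
  | nil => simp [pvVal]
  | cons c cs ih => simp [pvVal, ih, List.length_cons, Nat.mul_succ, pow_add]; ring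

lemma pvVal_bounds (xs : List Int) (h : ∀ x ∈ xs, 0 ≤ x ∧ x < 2 ^ 16) :
    0 ≤ pvVal xs ∧ pvVal xs < 2 ^ (16 * xs.length) := by
  induction xs with
  | nil => simp [pvVal]
  | cons c cs ih =>
    have hc := h c (by simp)
    have ihs := ih (fun x hx => h x (by simp [hx]))
    simp only [pvVal, List.length_cons, Nat.mul_succ, pow_add]
    constructor
    · nlinarith [hc.1, ihs.1]
    · nlinarith [hc.2, ihs.2, ihs.1]

lemma pvHorner (bs : List Int) : ∀ a : Int,
    bs.foldl (fun w x => w * 2 ^ 16 + x) a = a * 2 ^ (16 * bs.length) + pvVal bs.reverse := by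
  induction bs with
  | nil => intro a; simp [pvVal]
  | cons b bs ih =>
    intro a
    simp only [List.foldl_cons, ih, List.reverse_cons, pvVal_append, List.length_cons,
      List.length_reverse, Nat.mul_succ, pow_add, pvVal]
    ring

lemma pvShift_succ (n : Nat) (t : Int) :
    pvShift (n + 1) t = PySem.Int.floordiv (pvShift n t) (2 ^ 16) := by
  induction n generalizing t with
  | zero => rfl
  | succ n ih => simp only [pvShift]; exact ih _

lemma pvLow_snoc (n : Nat) (t : Int) :
    pvLow (n + 1) t = pvLow n t ++ [PySem.Int.mod (pvShift n t) (2 ^ 16)] := by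
  induction n generalizing t with
  | zero => rfl
  | succ n ih =>
    show PySem.Int.mod t (2 ^ 16) :: pvLow (n + 1) (PySem.Int.floordiv t (2 ^ 16)) = _
    rw [ih]
    rfl

lemma pvStepB_eq (ch : List Int) (c : Int) (p : List Int) :
    pvStepB (ch, c) p = (ch ++ pvLow 5 (c + pvV p), pvShift 5 (c + pvV p)) := by
  have key : ∀ (n : Nat) (t : Int),
      (List.range n).foldl
        (fun (r : List Int × Int) _ =>
          (r.1 ++ [PySem.Int.mod r.2 (2 ^ 16)], PySem.Int.floordiv r.2 (2 ^ 16)))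
        (ch, t) = (ch ++ pvLow n t, pvShift n t) := by
    intro n
    induction n with
    | zero => intro t; simp [pvLow, pvShift]
    | succ n ih =>
      intro t
      rw [List.range_succ, List.foldl_append, ih]
      simp only [List.foldl_cons, List.foldl_nil, pvLow_snoc, pvShift_succ, List.append_assoc]
  have ht : c + PySem.List.pyGetD p 1 0 * 2 ^ 64 + PySem.List.pyGetD p 0 0 = c + pvV p := by
    unfold pvV; ring
  unfold pvStepB
  rw [ht, key]

lemma pvLow_val (n : Nat) : ∀ t : Int,
    pvVal (pvLow n t) + pvShift n t * 2 ^ (16 * n) = t := by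
  induction n with
  | zero => intro t; simp [pvLow, pvShift, pvVal]
  | succ n ih =>
    intro t
    have hdm := PySem.Int.floordiv_mul_add_mod t (2 ^ 16)
    simp only [pvLow, pvShift, pvVal, Nat.mul_succ, pow_add]
    have := ih (PySem.Int.floordiv t (2 ^ 16))
    nlinarith [this, hdm]

lemma pvLow_mem (n : Nat) : ∀ (t : Int), ∀ x ∈ pvLow n t, 0 ≤ x ∧ x < 2 ^ 16 := by
  induction n with
  | zero => intro t x hx; simp [pvLow] at hx
  | succ n ih =>
    intro t x hx
    simp only [pvLow, List.mem_cons] at hx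
    rcases hx with h | h
    · subst h
      rw [PySem.Int.mod_eq_emod_of_pos (by norm_num)]
      exact ⟨Int.emod_nonneg t (by norm_num), Int.emod_lt_of_pos t (by norm_num)⟩
    · exact ih _ x h


lemma pvFoldA (ps : List (List Int)) : ∀ (i k : Int),
    ps.foldl pvStepA (i, k) = (i + 80 * ps.length, k * 2 ^ (80 * ps.length) + pvStream ps) := by
  induction ps with
  | nil => intro i k; simp [pvStream]
  | cons p tl ih =>
    intro i k
    have hstep : pvStepA (i, k) p = (i + 80, k * 2 ^ 80 + pvV p) := by
      unfold pvStepA pvV; simp; ring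
    simp only [List.foldl_cons, hstep, ih, pvStream, List.length_cons, Nat.mul_succ, pow_add,
      Prod.mk.injEq]
    constructor
    · push_cast; ring
    · ring

lemma pvVal_replicate (z : Nat) : pvVal (List.replicate z 0) = 0 := by
  induction z with
  | zero => rfl
  | succ z ih => simp [List.replicate_succ, pvVal, ih]

lemma pvFoldB (z : Nat) (ps : List (List Int)) :
    (ps.reverse.foldl pvStepB (List.replicate z 0, 0)).1.length = z + 5 * ps.length ∧
    (∀ x ∈ (ps.reverse.foldl pvStepB (List.replicate z 0, 0)).1, 0 ≤ x ∧ x < 2 ^ 16) ∧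
    pvVal (ps.reverse.foldl pvStepB (List.replicate z 0, 0)).1 +
      (ps.reverse.foldl pvStepB (List.replicate z 0, 0)).2 *
        2 ^ (16 * (ps.reverse.foldl pvStepB (List.replicate z 0, 0)).1.length) =
      pvStream ps * 2 ^ (16 * z) := by
  induction ps with
  | nil =>
    refine ⟨by simp, by intro x hx; simp at hx; simp [hx], ?_⟩
    simp [pvVal_replicate, pvStream]
  | cons p tl ih =>
    obtain ⟨hlen, hmem, hval⟩ := ih
    have hfold : (p :: tl).reverse.foldl pvStepB (List.replicate z 0, 0) =
        pvStepB (tl.reverse.foldl pvStepB (List.replicate z 0, 0)) p := by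
      simp [List.foldl_append]
    set r := tl.reverse.foldl pvStepB (List.replicate z 0, 0) with hr
    have hstep : pvStepB r p = (r.1 ++ pvLow 5 (r.2 + pvV p), pvShift 5 (r.2 + pvV p)) := by
      rw [← pvStepB_eq r.1 r.2 p]
    set t := r.2 + pvV p with htdef
    rw [hfold, hstep]
    have hlowlen : (pvLow 5 t).length = 5 := rfl
    have hlen' : (r.1 ++ pvLow 5 t).length = z + 5 * (tl.length + 1) := by
      simp [hlowlen, hlen]; omega
    refine ⟨by simpa using hlen', ?_, ?_⟩
    · intro x hx
      rcases List.mem_append.mp hx with h | h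
      · exact hmem x h
      · exact pvLow_mem 5 t x h
    · have hlv := pvLow_val 5 t
      simp only [hlen']
      rw [pvVal_append]
      have hexp1 : (16 : ℕ) * (z + 5 * (tl.length + 1)) = 16 * r.1.length + 16 * 5 := by
        omega
      have hexp2 : (16 : ℕ) * r.1.length = 16 * z + 80 * tl.length := by omega
      rw [hexp1, pow_add]
      have hstream : pvStream (p :: tl) = pvV p * 2 ^ (80 * tl.length) + pvStream tl := rfl
      rw [hstream]
      have e1 : (2 : Int) ^ (16 * r.1.length) = 2 ^ (16 * z) * 2 ^ (80 * tl.length) := by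
        rw [hexp2, pow_add]
      linear_combination hval + (2:Int) ^ (16 * r.1.length) * hlv +
        (2:Int) ^ (16 * r.1.length) * htdef + pvV p * e1

lemma pvDigits_drophigh (L : Nat) : ∀ (v c : Int),
    pvDigits L (v + c * 2 ^ (256 * L)) = pvDigits L v := by
  induction L with
  | zero => intro v c; rfl
  | succ L ih =>
    intro v c
    have hpos : (0 : Int) < 2 ^ 256 := by positivity
    have hsplit : v + c * 2 ^ (256 * (L + 1)) = v + 2 ^ 256 * (c * 2 ^ (256 * L)) := by
      rw [Nat.mul_succ, pow_add]; ring
    simp only [pvDigits, hsplit]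
    rw [PySem.Int.mod_eq_emod_of_pos hpos, PySem.Int.mod_eq_emod_of_pos hpos,
        PySem.Int.floordiv_eq_ediv_of_pos hpos, PySem.Int.floordiv_eq_ediv_of_pos hpos]
    congr 1
    · exact Int.add_mul_emod_self_left _ _ _
    · rw [Int.add_mul_ediv_left v _ (by norm_num : (2:Int)^256 ≠ 0)]
      exact ih (v / 2 ^ 256) c

lemma pvDigits_val (L : Nat) : ∀ (ch : List Int),
    (∀ x ∈ ch, 0 ≤ x ∧ x < 2 ^ 16) → ch.length = 16 * L →
    pvDigits L (pvVal ch) = pvWordsLE L ch := by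
  induction L with
  | zero =>
    intro ch _ hlen
    have : ch = [] := List.eq_nil_of_length_eq_zero (by omega)
    subst this; rfl
  | succ L ih =>
    intro ch hmem hlen
    have hts : ch = ch.take 16 ++ ch.drop 16 := (List.take_append_drop 16 ch).symm
    have htlen : (ch.take 16).length = 16 := by rw [List.length_take, hlen]; omega
    have hdlen : (ch.drop 16).length = 16 * L := by rw [List.length_drop, hlen]; omega
    have hbound := pvVal_bounds (ch.take 16)
      (fun x hx => hmem x (List.mem_of_mem_take hx))
    rw [htlen] at hbound
    have hb2 : pvVal (ch.take 16) < 2 ^ 256 := by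
      have := hbound.2; norm_num at this ⊢; exact this
    have hpos : (0 : Int) < 2 ^ 256 := by positivity
    have hvsplit : pvVal ch = pvVal (ch.take 16) + 2 ^ 256 * pvVal (ch.drop 16) := by
      conv_lhs => rw [hts]
      rw [pvVal_append, htlen]
    simp only [pvDigits, pvWordsLE]
    congr 1
    · rw [hvsplit, PySem.Int.mod_eq_emod_of_pos hpos, Int.add_mul_emod_self_left,
        Int.emod_eq_of_lt hbound.1 hb2]
      rw [pvHorner]
      simp
    · rw [hvsplit, PySem.Int.floordiv_eq_ediv_of_pos hpos,
        Int.add_mul_ediv_left _ _ (by norm_num : (2:Int)^256 ≠ 0),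
        Int.ediv_eq_zero_of_lt hbound.1 hb2, zero_add]
      exact ih (ch.drop 16) (fun x hx => hmem x (List.mem_of_mem_drop hx)) hdlen

lemma pvPackWords_append (L : Nat) : ∀ (xs g : List Int),
    xs.length = 16 * L → g.length = 16 →
    pvPackWords (xs ++ g) = pvPackWords xs ++ [g.foldl (fun w x => w * 2 ^ 16 + x) 0] := by
  induction L with
  | zero =>
    intro xs g hx hg
    have : xs = [] := List.eq_nil_of_length_eq_zero (by omega)
    subst this
    cases g with
    | nil => simp at hg
    | cons c cs =>
      simp only [List.nil_append, pvPackWords]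
      rw [List.take_of_length_le (by omega), List.drop_eq_nil_of_le (by omega)]
      simp [pvPackWords]
  | succ L ih =>
    intro xs g hx hg
    cases xs with
    | nil => simp at hx
    | cons c cs =>
      have h16 : 16 ≤ (c :: cs).length := by simp at hx ⊢; omega
      show pvPackWords (c :: (cs ++ g)) = _
      rw [pvPackWords, pvPackWords]
      have ht : (c :: (cs ++ g)).take 16 = (c :: cs).take 16 := by
        rw [show (c :: (cs ++ g)) = (c :: cs) ++ g by simp, List.take_append_of_le_length h16]
      have hd : (c :: (cs ++ g)).drop 16 = (c :: cs).drop 16 ++ g := by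
        rw [show (c :: (cs ++ g)) = (c :: cs) ++ g by simp, List.drop_append_of_le_length h16]
      rw [ht, hd, ih ((c :: cs).drop 16) g (by simp at hx ⊢; omega) hg]
      simp

lemma pvPackWords_rev (L : Nat) : ∀ (ch : List Int), ch.length = 16 * L →
    pvPackWords ch.reverse = (pvWordsLE L ch).reverse := by
  induction L with
  | zero =>
    intro ch hlen
    have : ch = [] := List.eq_nil_of_length_eq_zero (by omega)
    subst this; simp [pvPackWords, pvWordsLE]
  | succ L ih =>
    intro ch hlen
    have hts : ch = ch.take 16 ++ ch.drop 16 := (List.take_append_drop 16 ch).symm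
    have htlen : (ch.take 16).length = 16 := by rw [List.length_take, hlen]; omega
    have hdlen : (ch.drop 16).length = 16 * L := by rw [List.length_drop, hlen]; omega
    conv_lhs => rw [hts]
    rw [List.reverse_append,
      pvPackWords_append L (ch.drop 16).reverse (ch.take 16).reverse (by simp [hdlen])
        (by simp [htlen]),
      ih (ch.drop 16) hdlen]
    simp only [pvWordsLE, List.reverse_cons]

-- ===== VERDICT (by name: the statement is the Claim_ definition above) =====
theorem encodeKernelCompact_spec : Claim_equal_encodeKernelCompact := by
  intro kernel _ _
  show encodeKernelCompact kernel = encodeKernelCompact_alt kernel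
  simp only [encodeKernelCompact, encodeKernelCompact_alt, pvFoldA, zero_mul, zero_add]
  set pts := kernel.drop 1 with hpts
  set m := pts.length with hm
  set M := PySem.Int.mod (80 * (m : Int)) 256 with hM
  set padN := (PySem.Int.mod (-80 * (m : Int)) 256).toNat with hpad
  set z := padN / 16 with hz
  obtain ⟨hlen, hmem, hval⟩ := pvFoldB z pts
  set ch := (pts.reverse.foldl pvStepB (List.replicate z 0, 0)).1 with hch
  set cc := (pts.reverse.foldl pvStepB (List.replicate z 0, 0)).2 with hcc
  set iF : Int := if M ≠ 0 then 80 * (m : Int) + (256 - M) else 80 * (m : Int) with hiF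
  set L := (PySem.Int.floordiv iF 256).toNat with hL
  have hMe : M = (80 * (m : Int)) % 256 := by
    rw [hM, PySem.Int.mod_eq_emod_of_pos (by norm_num)]
  have hPe : (padN : Int) = (-80 * (m : Int)) % 256 := by
    have hnn : (0 : Int) ≤ (-80 * (m : Int)) % 256 := Int.emod_nonneg _ (by norm_num)
    rw [hpad, PySem.Int.mod_eq_emod_of_pos (by norm_num)]
    omega
  have h16z : 16 * z = padN := by rw [hz]; omega
  have hKA : (if M ≠ 0 then pvStream pts * 2 ^ (256 - M).toNat else pvStream pts)
      = pvStream pts * 2 ^ padN := by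
    by_cases hMz : M = 0
    · have hp0 : padN = 0 := by omega
      simp [hMz, hp0]
    · have hp : (256 - M).toNat = padN := by omega
      simp [hMz, hp]
  have hiFval : iF = 80 * (m : Int) + (padN : Int) := by
    rw [hiF]
    split_ifs with h
    · omega
    · omega
  have hL256 : 256 * L = 80 * m + padN := by
    rw [hL, hiFval, PySem.Int.floordiv_eq_ediv_of_pos (by norm_num)]
    omega
  have hchlen : ch.length = 16 * L := by omega
  have hexp : 16 * ch.length = 256 * L := by omega
  rw [hexp, h16z] at hval
  rw [hKA, pvFillA_eq, List.append_nil, ← hval, pvDigits_drophigh,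
    pvDigits_val L ch hmem hchlen, ← pvPackWords_rev L ch hchlen]
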